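-- pv_equiv track=rewrite | github.com/jacekkosinski/photos-manager | photos_manager/find.py | normalize_camera_slug
-- ===== SOURCE A (Python) =====
-- def normalize_camera_slug(make: str, model: str) -> str:
--     """Normalise EXIF Make/Model into a URL-safe slug.
--
--     Args:
--         make: Camera manufacturer string (e.g. ``"Canon"``).
--         model: Camera model string (e.g. ``"Canon EOS 5D Mark IV"``).
--
--     Returns:
--         Slug such as ``"canon-eos-5d-mark-iv"``.
--
--     Examples:
--         >>> normalize_camera_slug("Canon", "Canon EOS 5D Mark IV")
--         'canon-eos-5d-mark-iv'
--         >>> normalize_camera_slug("Apple", "iPhone 14 Pro")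
--         'apple-iphone-14-pro'
--         >>> normalize_camera_slug("SONY", "DSC-W170")
--         'sony-dsc-w170'
--     """
--     make_clean = make.strip("\x00 ").lower()
--     model_clean = model.strip("\x00 ").lower()
--
--     # Strip make prefix from model if present
--     if model_clean.startswith(make_clean):
--         model_part = model_clean[len(make_clean) :].strip("\x00 ")
--     else:
--         model_part = model_clean
--
--     combined = f"{make_clean}-{model_part}" if model_part else make_clean
--
--     # Replace separator characters and collapse repeated hyphens
--     for ch in (" ", ".", "_", "/"):
--         combined = combined.replace(ch, "-")
--     while "--" in combined:
--         combined = combined.replace("--", "-")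
--     return combined.strip("-")
-- ===== SOURCE B (Python) =====
-- def normalize_camera_slug(make: str, model: str) -> str:
--     """Normalise EXIF Make/Model into a URL-safe slug (single-pass variant)."""
--     make_clean = make.strip("\x00 ").lower()
--     model_clean = model.strip("\x00 ").lower()
--
--     # Strip make prefix from model if present
--     if model_clean.startswith(make_clean):
--         model_part = model_clean[len(make_clean):].strip("\x00 ")
--     else:
--         model_part = model_clean
--
--     combined = f"{make_clean}-{model_part}" if model_part else make_clean
--
--     # One left-to-right scan: separators (and existing hyphens) become a single
--     # '-', runs collapse via a last-was-hyphen flag.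
--     out = []
--     prev_hyphen = False
--     for c in combined:
--         if c in " ._/-":
--             if not prev_hyphen:
--                 out.append("-")
--                 prev_hyphen = True
--         else:
--             out.append(c)
--             prev_hyphen = False
--     return "".join(out).strip("-")
-- ===== Notes on version B (the rewrite author's own statement) =====
-- stated objective: simpler
-- what changed: The four full-string replace passes plus the repeated while '--' rescans are replaced by one left-to-right scan that maps separators to '-' and collapses hyphen runs with a last-was-hyphen flag.
import Mathlib
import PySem

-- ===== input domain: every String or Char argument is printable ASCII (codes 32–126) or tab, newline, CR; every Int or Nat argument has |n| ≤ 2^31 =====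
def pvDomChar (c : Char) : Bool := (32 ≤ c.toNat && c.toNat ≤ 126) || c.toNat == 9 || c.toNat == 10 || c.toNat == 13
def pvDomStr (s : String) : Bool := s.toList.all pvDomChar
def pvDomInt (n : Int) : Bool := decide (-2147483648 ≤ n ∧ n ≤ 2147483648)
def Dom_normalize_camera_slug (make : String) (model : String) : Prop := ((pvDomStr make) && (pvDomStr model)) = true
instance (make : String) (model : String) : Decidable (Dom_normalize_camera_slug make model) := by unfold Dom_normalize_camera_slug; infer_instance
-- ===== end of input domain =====

-- B replaces A's four full-string replace passes and the repeated `while "--"` rescans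
-- by one left-to-right scan with a last-was-hyphen flag; return values proved equal.

-- ===== PORT A =====
-- pvRep2 is the effect of one Python pass `s.replace("--", "-")`; it and its length
-- lemmas are needed by the termination proof (pvCollapse_dec) of the while-loop port.
def pvRep2 : List Char → List Char
  | [] => []
  | [c] => [c]
  | c :: d :: t => if c = '-' ∧ d = '-' then '-' :: pvRep2 t else c :: pvRep2 (d :: t)

theorem pvRep2_cons_not (c : Char) (u : List Char)
    (h : ¬(c = '-' ∧ u.head? = some '-')) : pvRep2 (c :: u) = c :: pvRep2 u := by
  match u with
  | [] => rfl
  | d :: v => simp only [List.head?] at h; rw [pvRep2, if_neg (by simpa using h)]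

theorem pvRep2_pair (u : List Char) : pvRep2 ('-' :: '-' :: u) = '-' :: pvRep2 u := by
  rw [pvRep2, if_pos ⟨rfl, rfl⟩]

theorem pvRep2_length_le (l : List Char) : (pvRep2 l).length ≤ l.length := by
  induction hn : l.length using Nat.strong_induction_on generalizing l with
  | _ n ih =>
  subst hn
  match l with
  | [] => simp [pvRep2]
  | [c] => simp [pvRep2]
  | c :: d :: t =>
    rw [pvRep2]
    split
    · have := ih t.length (by simp) t rfl; simp only [List.length_cons] at *; omega
    · have := ih (d :: t).length (by simp) (d :: t) rfl; simp only [List.length_cons] at *; omega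

theorem pvRep2_length_lt (l : List Char) (h : ['-', '-'] <:+: l) :
    (pvRep2 l).length < l.length := by
  induction l with
  | nil => simp at h
  | cons c u ih =>
    by_cases hc : c = '-' ∧ u.head? = some '-'
    · obtain ⟨rfl, hh⟩ := hc
      cases u with
      | nil => simp at hh
      | cons d v =>
        have hd : d = '-' := by simpa using hh
        subst hd
        rw [pvRep2_pair]
        have := pvRep2_length_le v; simp only [List.length_cons] at *; omega
    · rw [pvRep2_cons_not c u hc]
      rcases List.infix_cons_iff.mp h with hp | hi
      · exfalso
        obtain ⟨r, hr⟩ := hp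
        have h2 : ('-' : Char) :: '-' :: r = c :: u := by simpa using hr
        obtain ⟨e1, e2⟩ := List.cons_eq_cons.mp h2
        exact hc ⟨e1.symm, by rw [← e2]; rfl⟩
      · simpa using ih hi

theorem pvGoPair (fuel : Nat) :
    ∀ (l acc : List Char), l.length ≤ fuel →
      PySem.Chars.replace.go ['-', '-'] ['-'] fuel l acc = acc.reverse ++ pvRep2 l := by
  induction fuel with
  | zero =>
    intro l acc h
    have hl : l = [] := by cases l <;> simp_all
    subst hl; rw [PySem.Chars.replace.go.eq_def]; simp [pvRep2]
  | succ n ih =>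
    intro l acc h
    match l with
    | [] => rw [PySem.Chars.replace.go.eq_def]; simp [pvRep2]
    | c :: t =>
      simp only [List.length_cons] at h
      by_cases hc : c = '-' ∧ t.head? = some '-'
      · obtain ⟨rfl, hh⟩ := hc
        cases t with
        | nil => simp at hh
        | cons d v =>
          have hd : d = '-' := by simpa using hh
          subst hd
          simp only [List.length_cons] at h
          have hstep : PySem.Chars.replace.go ['-','-'] ['-'] (n+1) ('-'::'-'::v) acc
              = PySem.Chars.replace.go ['-','-'] ['-'] n v (['-'].reverse ++ acc) := by
            rw [PySem.Chars.replace.go.eq_def]; simp [List.isPrefixOf]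
          rw [hstep, ih v _ (by omega), pvRep2_pair]
          simp
      · have hp : List.isPrefixOf ['-', '-'] (c :: t) = false := by
          rcases t with _ | ⟨d, v⟩
          · simp [List.isPrefixOf]
          · simp only [List.head?, Option.some.injEq] at hc
            simp [List.isPrefixOf]
            intro h1; subst h1; intro h2; exact hc ⟨rfl, h2.symm⟩
        have hstep : PySem.Chars.replace.go ['-','-'] ['-'] (n+1) (c::t) acc
            = PySem.Chars.replace.go ['-','-'] ['-'] n t (c :: acc) := by
          rw [PySem.Chars.replace.go.eq_def]; simp [hp]
        rw [hstep, ih t _ (by omega), pvRep2_cons_not c t hc]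
        simp

theorem pvReplacePair (l : List Char) :
    PySem.Chars.replace l ['-', '-'] ['-'] = pvRep2 l := by
  rw [PySem.Chars.replace, if_neg (by simp)]
  simpa using pvGoPair l.length l [] le_rfl

theorem pvCollapse_dec (s : String) (h : PySem.Str.isIn "--" s = true) :
    (PySem.Str.replace s "--" "-").toList.length < s.toList.length := by
  rw [PySem.Str.toList_replace]
  have hi : ['-', '-'] <:+: s.toList := by
    simpa using (PySem.Str.isIn_iff_infix "--" s).mp h
  have h2 : ("--" : String).toList = ['-','-'] := rfl
  have h3 : ("-" : String).toList = ['-'] := rfl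
  rw [h2, h3, pvReplacePair]
  exact pvRep2_length_lt s.toList hi



-- `while "--" in combined: combined = combined.replace("--", "-")`
def pvCollapseA (s : String) : String :=
  if h : PySem.Str.isIn "--" s = true then pvCollapseA (PySem.Str.replace s "--" "-") else s
termination_by s.toList.length
decreasing_by exact pvCollapse_dec s h

def normalize_camera_slug (make : String) (model : String) : String :=
  let make_clean := PySem.Str.lower (PySem.Str.stripChars make "\x00 ")
  let model_clean := PySem.Str.lower (PySem.Str.stripChars model "\x00 ")
  let model_part :=
    if PySem.Str.startswith model_clean make_clean = true then
      PySem.Str.stripChars (PySem.Str.slice model_clean (some (PySem.Str.len make_clean)) none) "\x00 "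
    else model_clean
  -- f-string concatenation ported as "".join
  let combined := if model_part ≠ "" then PySem.Str.join "" [make_clean, "-", model_part] else make_clean
  -- `for ch in (" ", ".", "_", "/"): combined = combined.replace(ch, "-")`
  let combined2 := List.foldl (fun s ch => PySem.Str.replace s ch "-") combined [" ", ".", "_", "/"]
  PySem.Str.stripChars (pvCollapseA combined2) "-"

-- ===== PORT B =====
def normalize_camera_slug_alt (make : String) (model : String) : String :=
  let make_clean := PySem.Str.lower (PySem.Str.stripChars make "\x00 ")
  let model_clean := PySem.Str.lower (PySem.Str.stripChars model "\x00 ")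
  let model_part :=
    if PySem.Str.startswith model_clean make_clean = true then
      PySem.Str.stripChars (PySem.Str.slice model_clean (some (PySem.Str.len make_clean)) none) "\x00 "
    else model_clean
  let combined := if model_part ≠ "" then PySem.Str.join "" [make_clean, "-", model_part] else make_clean
  -- one scan; state = (out, prev_hyphen); `c in " ._/-"` is char membership;
  -- `"".join(out)` of single characters is String.ofList
  let st := List.foldl
    (fun (p : List Char × Bool) c =>
      if (" ._/-" : String).toList.contains c then
        if p.2 then p else (p.1 ++ ['-'], true)
      else (p.1 ++ [c], false))
    ([], false) combined.toList
  PySem.Str.stripChars (String.ofList st.1) "-"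

-- ===== PRECONDITION & SPEC =====
def Spec_normalize_camera_slug (make : String) (model : String) (out : String) : Prop := out = normalize_camera_slug_alt make model
instance (make : String) (model : String) (out : String) : Decidable (Spec_normalize_camera_slug make model out) := by unfold Spec_normalize_camera_slug; infer_instance

-- ===== CLAIM (what is proved, stated in full; the proofs are below) =====
def Claim_equal_normalize_camera_slug : Prop := ∀ (make : String) (model : String), Dom_normalize_camera_slug make model → Spec_normalize_camera_slug make model (normalize_camera_slug make model)

-- ===== LEMMAS AND PROOFS =====

theorem pvGoSingle (a b : Char) (fuel : Nat) :
    ∀ (l acc : List Char), l.length ≤ fuel →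
      PySem.Chars.replace.go [a] [b] fuel l acc
        = acc.reverse ++ l.map (fun c => if c = a then b else c) := by
  induction fuel with
  | zero =>
    intro l acc h
    have hl : l = [] := by cases l <;> simp_all
    subst hl; rw [PySem.Chars.replace.go.eq_def]; simp
  | succ n ih =>
    intro l acc h
    match l with
    | [] => rw [PySem.Chars.replace.go.eq_def]; simp
    | c :: t =>
      simp only [List.length_cons] at h
      by_cases hc : c = a
      · subst hc
        have hstep : PySem.Chars.replace.go [c] [b] (n+1) (c::t) acc
            = PySem.Chars.replace.go [c] [b] n t ([b].reverse ++ acc) := by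
          rw [PySem.Chars.replace.go.eq_def]; simp [List.isPrefixOf]
        rw [hstep, ih t _ (by omega)]
        simp
      · have hp : List.isPrefixOf [a] (c :: t) = false := by
          simp [List.isPrefixOf]; intro h1; exact hc h1.symm
        have hstep : PySem.Chars.replace.go [a] [b] (n+1) (c::t) acc
            = PySem.Chars.replace.go [a] [b] n t (c :: acc) := by
          rw [PySem.Chars.replace.go.eq_def]; simp [hp]
        rw [hstep, ih t _ (by omega)]
        simp [hc]

theorem pvReplaceSingle (l : List Char) (a b : Char) :
    PySem.Chars.replace l [a] [b] = l.map (fun c => if c = a then b else c) := by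
  rw [PySem.Chars.replace, if_neg (by simp)]
  simpa using pvGoSingle a b l.length l [] le_rfl

def pvSqh : List Char → List Char
  | [] => []
  | c :: t =>
    if c = '-' then '-' :: pvSqh (t.dropWhile (· == '-')) else c :: pvSqh t
termination_by l => l.length
decreasing_by
  · have := List.length_dropWhile_le (fun x => x == '-') t; simp; omega
  · simp

theorem pvSqh_nil : pvSqh [] = [] := by rw [pvSqh]

theorem pvSqh_hyph (t : List Char) :
    pvSqh ('-' :: t) = '-' :: pvSqh (t.dropWhile (· == '-')) := by
  rw [pvSqh]; simp

theorem pvSqh_ne (c : Char) (t : List Char) (h : ¬ c = '-') :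
    pvSqh (c :: t) = c :: pvSqh t := by
  rw [pvSqh]; simp [h]

theorem pvDw_cons_ne (d : Char) (u : List Char) (h : ¬ d = '-') :
    (d :: u).dropWhile (· == '-') = d :: u := by
  rw [List.dropWhile_cons]; simp [h]

theorem pvDw_rep2_of_ne (d : Char) (u : List Char) (h : ¬ d = '-') :
    (pvRep2 (d :: u)).dropWhile (· == '-') = pvRep2 (d :: u) := by
  rw [pvRep2_cons_not d u (by simp [h]), pvDw_cons_ne d _ h]

theorem pvLM (n : Nat) : ∀ t : List Char, t.length ≤ n →
    (pvSqh (pvRep2 t) = pvSqh t ∧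
     pvSqh ((pvRep2 t).dropWhile (· == '-')) = pvSqh (t.dropWhile (· == '-'))) := by
  induction n with
  | zero =>
    intro t ht
    have : t = [] := by cases t <;> simp_all
    subst this; simp [pvRep2]
  | succ n ih =>
    intro t ht
    have L : pvSqh (pvRep2 t) = pvSqh t := by
      match t with
      | [] => rfl
      | [c] => rfl
      | c :: d :: u =>
        simp only [List.length_cons] at ht
        by_cases hcd : c = '-' ∧ d = '-'
        · obtain ⟨rfl, rfl⟩ := hcd
          rw [pvRep2_pair, pvSqh_hyph, pvSqh_hyph]
          rw [show ('-' :: u).dropWhile (· == '-') = u.dropWhile (· == '-') from by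
            simp [List.dropWhile]]
          rw [(ih u (by omega)).2]
        · by_cases hc : c = '-'
          · subst hc
            have hd : ¬ d = '-' := fun hd => hcd ⟨rfl, hd⟩
            rw [pvRep2_cons_not _ _ (by simp [hd]), pvSqh_hyph, pvSqh_hyph]
            rw [pvDw_rep2_of_ne d u hd, pvDw_cons_ne d u hd]
            rw [(ih (d :: u) (by simp; omega)).1]
          · rw [pvRep2_cons_not _ _ (by simp [hc]), pvSqh_ne _ _ hc, pvSqh_ne _ _ hc]
            rw [(ih (d :: u) (by simp; omega)).1]
    refine ⟨L, ?_⟩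
    match t with
    | [] => rfl
    | c :: u =>
      simp only [List.length_cons] at ht
      by_cases hc : c = '-'
      · subst hc
        cases u with
        | nil => rfl
        | cons d v =>
          by_cases hd : d = '-'
          · subst hd
            rw [pvRep2_pair]
            rw [show ('-' :: pvRep2 v).dropWhile (· == '-') = (pvRep2 v).dropWhile (· == '-') from by
              simp [List.dropWhile]]
            rw [show ('-' :: '-' :: v).dropWhile (· == '-') = v.dropWhile (· == '-') from by
              simp [List.dropWhile]]
            exact (ih v (by simp at ht; omega)).2
          · rw [pvRep2_cons_not _ _ (by simp [hd])]
            rw [show ('-' :: pvRep2 (d :: v)).dropWhile (· == '-')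
                = (pvRep2 (d :: v)).dropWhile (· == '-') from by simp [List.dropWhile]]
            rw [show ('-' :: d :: v).dropWhile (· == '-') = (d :: v).dropWhile (· == '-') from by
              simp [List.dropWhile]]
            rw [pvDw_rep2_of_ne d v hd, pvDw_cons_ne d v hd]
            exact (ih (d :: v) (by omega)).1
      · rw [pvDw_rep2_of_ne c u hc, pvDw_cons_ne c u hc]
        exact L

theorem pvSqh_rep2 (t : List Char) : pvSqh (pvRep2 t) = pvSqh t :=
  (pvLM t.length t le_rfl).1

theorem pvSqh_of_no_pair (l : List Char) (h : ¬ (['-', '-'] <:+: l)) : pvSqh l = l := by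
  induction l with
  | nil => exact pvSqh_nil
  | cons c u ih =>
    have hu : ¬ (['-', '-'] <:+: u) := fun hi => h (List.infix_cons_iff.mpr (Or.inr hi))
    by_cases hc : c = '-'
    · subst hc
      have hdw : u.dropWhile (· == '-') = u := by
        cases u with
        | nil => rfl
        | cons d v =>
          have hd : ¬ d = '-' := by
            rintro rfl
            exact h (List.infix_cons_iff.mpr (Or.inl ⟨v, rfl⟩))
          exact pvDw_cons_ne d v hd
      rw [pvSqh_hyph, hdw, ih hu]
    · rw [pvSqh_ne c u hc, ih hu]

theorem pvCollapseA_toList (x : String) : (pvCollapseA x).toList = pvSqh x.toList := by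
  induction hn : x.toList.length using Nat.strong_induction_on generalizing x with
  | _ n ih =>
  subst hn
  rw [pvCollapseA]
  by_cases h : PySem.Str.isIn "--" x = true
  · rw [dif_pos h]
    rw [ih _ (pvCollapse_dec x h) _ rfl]
    rw [PySem.Str.toList_replace]
    rw [show ("--" : String).toList = ['-','-'] from rfl, show ("-" : String).toList = ['-'] from rfl]
    rw [pvReplacePair, pvSqh_rep2]
  · rw [dif_neg h]
    have : ¬ (['-','-'] <:+: x.toList) := by
      intro hi
      exact h ((PySem.Str.isIn_iff_infix "--" x).mpr (by simpa using hi))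
    rw [pvSqh_of_no_pair _ this]

def pvIsSepB (c : Char) : Bool := (" ._/-" : String).toList.contains c

theorem pvIsSepB_eq (c : Char) :
    pvIsSepB c = (c == ' ' || c == '.' || c == '_' || c == '/' || c == '-') := by
  have h : (" ._/-" : String).toList = [' ', '.', '_', '/', '-'] := rfl
  rw [pvIsSepB, h]
  simp only [List.contains_cons, List.contains_nil, Bool.or_false, Bool.or_assoc]

def pvSq2 : Bool → List Char → List Char
  | _, [] => []
  | prev, c :: t =>
    if pvIsSepB c then (if prev then pvSq2 true t else '-' :: pvSq2 true t)
    else c :: pvSq2 false t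

def pvF4 (c : Char) : Char :=
  (fun c => if c = '/' then '-' else c)
  ((fun c => if c = '_' then '-' else c)
  ((fun c => if c = '.' then '-' else c)
  ((fun c => if c = ' ' then '-' else c) c)))

theorem pvF4_sep (c : Char) :
    (pvIsSepB c = true → pvF4 c = '-') ∧ (pvIsSepB c = false → pvF4 c = c ∧ ¬ c = '-') := by
  rw [pvIsSepB_eq]
  by_cases h1 : c = ' ' <;> by_cases h2 : c = '.' <;> by_cases h3 : c = '_' <;>
    by_cases h4 : c = '/' <;> by_cases h5 : c = '-' <;>
      simp_all [pvF4]

theorem pvFold4_toList (s : String) :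
    (List.foldl (fun s ch => PySem.Str.replace s ch "-") s [" ", ".", "_", "/"]).toList
      = s.toList.map pvF4 := by
  simp only [List.foldl_cons, List.foldl_nil]
  rw [PySem.Str.toList_replace, PySem.Str.toList_replace, PySem.Str.toList_replace,
    PySem.Str.toList_replace]
  rw [show (" " : String).toList = [' '] from rfl, show ("." : String).toList = ['.'] from rfl,
    show ("_" : String).toList = ['_'] from rfl, show ("/" : String).toList = ['/'] from rfl,
    show ("-" : String).toList = ['-'] from rfl]
  rw [pvReplaceSingle, pvReplaceSingle, pvReplaceSingle, pvReplaceSingle]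
  simp only [List.map_map]
  rfl

theorem pvBridge (l : List Char) :
    pvSq2 false l = pvSqh (l.map pvF4) ∧
    pvSq2 true l = pvSqh ((l.map pvF4).dropWhile (· == '-')) := by
  induction l with
  | nil => exact ⟨pvSqh_nil.symm, pvSqh_nil.symm⟩
  | cons c t ih =>
    by_cases hs : pvIsSepB c = true
    · have hf : pvF4 c = '-' := (pvF4_sep c).1 hs
      constructor
      · rw [show pvSq2 false (c :: t) = '-' :: pvSq2 true t from by rw [pvSq2]; simp [hs]]
        rw [List.map_cons, hf, pvSqh_hyph, ih.2]
      · rw [show pvSq2 true (c :: t) = pvSq2 true t from by rw [pvSq2]; simp [hs]]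
        rw [List.map_cons, hf, List.dropWhile_cons]
        simp only [beq_self_eq_true, if_true]
        exact ih.2
    · obtain ⟨hf, hne⟩ := (pvF4_sep c).2 (by simpa using hs)
      have h1 : pvSq2 false (c :: t) = c :: pvSq2 false t := by rw [pvSq2]; simp [hs]
      have h2 : pvSq2 true (c :: t) = c :: pvSq2 false t := by rw [pvSq2]; simp [hs]
      constructor
      · rw [h1, List.map_cons, hf, pvSqh_ne c _ hne, ih.1]
      · rw [h2, List.map_cons, hf, pvDw_cons_ne c _ hne, pvSqh_ne c _ hne, ih.1]

theorem pvScan (l : List Char) : ∀ (acc : List Char) (prev : Bool),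
    (List.foldl
      (fun (p : List Char × Bool) c =>
        if (" ._/-" : String).toList.contains c then
          if p.2 then p else (p.1 ++ ['-'], true)
        else (p.1 ++ [c], false))
      (acc, prev) l).1 = acc ++ pvSq2 prev l := by
  induction l with
  | nil => intro acc prev; simp [pvSq2]
  | cons c t ih =>
    intro acc prev
    rw [List.foldl_cons]
    by_cases hs : pvIsSepB c = true
    · rw [show (if (" ._/-" : String).toList.contains c then
          if prev then (acc, prev) else (acc ++ ['-'], true)
        else (acc ++ [c], false)) = if prev then (acc, prev) else (acc ++ ['-'], true) from by
          simp [pvIsSepB] at hs; simp [hs]]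
      cases prev with
      | true =>
        simp only [if_true]
        rw [ih acc true, show pvSq2 true (c :: t) = pvSq2 true t from by rw [pvSq2]; simp [hs]]
      | false =>
        simp only [Bool.false_eq_true, if_false]
        rw [ih (acc ++ ['-']) true,
          show pvSq2 false (c :: t) = '-' :: pvSq2 true t from by rw [pvSq2]; simp [hs]]
        simp
    · rw [show (if (" ._/-" : String).toList.contains c then
          if prev then (acc, prev) else (acc ++ ['-'], true)
        else (acc ++ [c], false)) = (acc ++ [c], false) from by
          simp [pvIsSepB] at hs; simp [hs]]
      rw [ih (acc ++ [c]) false]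
      rw [show pvSq2 prev (c :: t) = c :: pvSq2 false t from by rw [pvSq2]; simp [hs]]
      simp

theorem pvTail (s : String) :
    PySem.Str.stripChars
        (pvCollapseA (List.foldl (fun s ch => PySem.Str.replace s ch "-") s [" ", ".", "_", "/"])) "-"
      = PySem.Str.stripChars
        (String.ofList (List.foldl
          (fun (p : List Char × Bool) c =>
            if (" ._/-" : String).toList.contains c then
              if p.2 then p else (p.1 ++ ['-'], true)
            else (p.1 ++ [c], false))
          ([], false) s.toList).1) "-" := by
  congr 1
  rw [← String.toList_inj]
  rw [pvCollapseA_toList, pvFold4_toList, pvScan s.toList [] false]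
  simp only [List.nil_append]
  rw [(pvBridge s.toList).1]
  simp


-- ===== VERDICT (by name: the statement is the Claim_ definition above) =====
theorem normalize_camera_slug_spec : Claim_equal_normalize_camera_slug := by
  intro make model _
  unfold Spec_normalize_camera_slug normalize_camera_slug normalize_camera_slug_alt
  exact pvTail _
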